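-- pv_equiv track=rewrite | github.com/OpenBlatam/IA-Models-Clone | ai_document_classifier/templates/dynamic_template_generator.py | _apply_custom_requirements
-- ===== SOURCE A (Python) =====
-- from typing import Dict, List, Optional, Any, Union
--
-- def _apply_custom_requirements(sections: List[str], requirements: Dict[str, Any]) -> List[str]:
--     """Apply custom requirements to sections"""
--     # Add required sections
--     if "required_sections" in requirements:
--         sections.extend(requirements["required_sections"])
--
--     # Remove excluded sections
--     if "excluded_sections" in requirements:
--         sections = [s for s in sections if s not in requirements["excluded_sections"]]
--
--     # Reorder sections
--     if "section_order" in requirements: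
--         custom_order = requirements["section_order"]
--         ordered_sections = []
--         for section in custom_order:
--             if section in sections:
--                 ordered_sections.append(section)
--         # Add remaining sections
--         for section in sections:
--             if section not in ordered_sections:
--                 ordered_sections.append(section)
--         sections = ordered_sections
--
--     return list(dict.fromkeys(sections))  # Remove duplicates while preserving order
-- ===== SOURCE B (Python) =====
-- def _apply_custom_requirements(sections, requirements):
--     """Apply custom requirements to sections.
--
--     Reorder done by one stable sort on a first-occurrence index table
--     instead of A's two accumulator loops with membership scans.
--     """
--     sections.extend(requirements.get("required_sections", []))
--     excluded = requirements.get("excluded_sections", [])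
--     kept = [s for s in sections if s not in excluded]
--     if "section_order" in requirements:
--         custom_order = requirements["section_order"]
--         order_index = {}
--         for i, s in enumerate(custom_order):
--             if s not in order_index:
--                 order_index[s] = i
--         n = len(custom_order)
--         kept = sorted(kept, key=lambda s: order_index.get(s, n))
--     return list(dict.fromkeys(kept))
-- ===== Notes on version B (the rewrite author's own statement) =====
-- stated objective: alternative
-- what changed: The two-loop reorder (scan custom_order appending members, then scan sections appending unseen remainder) is replaced by a single stable sort of the kept sections keyed by a first-occurrence index table built from custom_order, with absent sections keyed past the end; extend, exclusion filter and final dict.fromkeys dedup are kept.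
import Mathlib
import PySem

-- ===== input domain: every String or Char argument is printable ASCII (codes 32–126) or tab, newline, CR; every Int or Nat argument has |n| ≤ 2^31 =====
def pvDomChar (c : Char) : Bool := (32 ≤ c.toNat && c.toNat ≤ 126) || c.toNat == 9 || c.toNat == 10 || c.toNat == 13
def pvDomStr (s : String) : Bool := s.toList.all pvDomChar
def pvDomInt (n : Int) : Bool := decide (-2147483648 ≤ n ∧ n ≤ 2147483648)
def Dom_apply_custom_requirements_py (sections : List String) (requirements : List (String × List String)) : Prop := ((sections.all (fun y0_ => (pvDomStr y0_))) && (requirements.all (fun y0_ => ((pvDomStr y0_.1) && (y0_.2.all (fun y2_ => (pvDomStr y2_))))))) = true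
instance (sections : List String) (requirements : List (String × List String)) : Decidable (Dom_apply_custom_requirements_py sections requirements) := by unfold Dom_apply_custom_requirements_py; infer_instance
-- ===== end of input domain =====

-- B replaces A's two-loop reorder by ONE stable sort on a first-occurrence index table (alternative algorithm,
-- same observable behaviour). Python A mutates `sections` in place via extend; B performs the same extend;
-- the equivalence proved here is about the RETURN value.

-- ===== PORT A =====
def apply_custom_requirements_py (sections : List String) (requirements : List (String × List String)) : List String :=
  let req : PySem.Dict String (List String) := PySem.Dict.mk requirements
  -- if "required_sections" in requirements: sections.extend(...)
  let sections1 :=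
    match req.get? "required_sections" with
    | some reqd => sections ++ reqd
    | none => sections
  -- if "excluded_sections" in requirements: sections = [s for s in sections if s not in ...]
  let sections2 :=
    match req.get? "excluded_sections" with
    | some excl => sections1.filter (fun s => !(excl.contains s))
    | none => sections1
  -- if "section_order" in requirements: two accumulator loops
  let sections3 :=
    match req.get? "section_order" with
    | some custom_order =>
      let ordered := custom_order.foldl
        (fun acc sec => if sections2.contains sec then acc ++ [sec] else acc) []
      let ordered2 := sections2.foldl
        (fun acc sec => if acc.contains sec then acc else acc ++ [sec]) ordered
      ordered2
    | none => sections2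
  PySem.List.dedup sections3

-- ===== PORT B =====
def apply_custom_requirements_py_alt (sections : List String) (requirements : List (String × List String)) : List String :=
  let req : PySem.Dict String (List String) := PySem.Dict.mk requirements
  -- sections.extend(requirements.get("required_sections", []))
  let sections1 := sections ++ req.getD "required_sections" []
  -- excluded = requirements.get("excluded_sections", []); kept = [s for s in sections if s not in excluded]
  let excluded := req.getD "excluded_sections" []
  let kept := sections1.filter (fun s => !(excluded.contains s))
  let kept2 :=
    match req.get? "section_order" with
    | some custom_order =>
      -- order_index: first-occurrence index of each section in custom_order
      let oi := (PySem.List.enumerate custom_order 0).foldl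
        (fun (d : PySem.Dict String Int) p => if d.contains p.2 then d else d.insert p.2 p.1)
        PySem.Dict.empty
      let n : Int := (custom_order.length : Int)
      PySem.List.sorted kept (fun s => oi.getD s n) false
    | none => kept
  PySem.List.dedup kept2

-- ===== PRECONDITION & SPEC =====
def Spec_apply_custom_requirements_py (sections : List String) (requirements : List (String × List String)) (out : List String) : Prop := out = apply_custom_requirements_py_alt sections requirements
instance (sections : List String) (requirements : List (String × List String)) (out : List String) : Decidable (Spec_apply_custom_requirements_py sections requirements out) := by unfold Spec_apply_custom_requirements_py; infer_instance

-- ===== CLAIM (what is proved, stated in full; the proofs are below) =====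
def Claim_equal_apply_custom_requirements_py : Prop := ∀ (sections : List String) (requirements : List (String × List String)), Dom_apply_custom_requirements_py sections requirements → Spec_apply_custom_requirements_py sections requirements (apply_custom_requirements_py sections requirements)

-- ===== LEMMAS AND PROOFS =====

-- canonical "remaining dedup walk": what a foldl of Set.add appends after the accumulator
def pvDD (acc : List String) : List String → List String
  | [] => []
  | s :: t => if s ∈ acc then pvDD acc t else s :: pvDD (acc ++ [s]) t

theorem pvFoldlAdd_eq_dd (Y : List String) : ∀ (acc : List String),
    Y.foldl PySem.Set.add acc = acc ++ pvDD acc Y := by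
  induction Y with
  | nil => intro acc; simp [pvDD]
  | cons s t ih =>
    intro acc
    by_cases h : s ∈ acc
    · simp [pvDD, h, PySem.Set.add, PySem.Set.contains, ih]
    · simp [pvDD, h, PySem.Set.add, PySem.Set.contains, ih (acc ++ [s])]

theorem pvOfList_eq_dd (Y : List String) : PySem.Set.ofList Y = pvDD [] Y := by
  simpa using pvFoldlAdd_eq_dd Y []

-- dropping elements already in the accumulator does not change the walk
theorem pvDD_filter (Y : List String) : ∀ (acc : List String) (q : String → Bool),
    (∀ s ∈ Y, q s = false → s ∈ acc) →
    pvDD acc Y = pvDD acc (Y.filter q) := by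
  induction Y with
  | nil => intro acc q _; simp
  | cons s t ih =>
    intro acc q h
    by_cases hq : q s
    · by_cases hc : s ∈ acc
      · simp only [pvDD, hc, if_true, List.filter_cons, hq, if_true]
        exact ih acc q (fun x hx hqx => h x (List.mem_cons_of_mem s hx) hqx)
      · simp only [pvDD, hc, List.filter_cons, hq, if_false, if_true]
        refine congrArg _ (ih (acc ++ [s]) q (fun x hx hqx => ?_))
        exact List.mem_append_left _ (h x (List.mem_cons_of_mem s hx) hqx)
    · have hc : s ∈ acc := h s List.mem_cons_self (by simpa using hq)
      simp only [pvDD, hc, if_true, List.filter_cons, hq]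
      simp only [Bool.false_eq_true, if_false]
      exact ih acc q (fun x hx hqx => h x (List.mem_cons_of_mem s hx) hqx)

-- the walk only depends on the accumulator through membership
theorem pvDD_congr (Y : List String) : ∀ (acc acc' : List String),
    (∀ s ∈ Y, s ∈ acc ↔ s ∈ acc') →
    pvDD acc Y = pvDD acc' Y := by
  induction Y with
  | nil => intro _ _ _; simp [pvDD]
  | cons s t ih =>
    intro acc acc' h
    have hs := h s List.mem_cons_self
    by_cases hc : s ∈ acc
    · simp only [pvDD, hc, hs.mp hc, if_true]
      exact ih acc acc' (fun x hx => h x (List.mem_cons_of_mem s hx))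
    · have hc' : s ∉ acc' := fun hx => hc (hs.mpr hx)
      simp only [pvDD, hc, hc', if_false]
      refine congrArg _ (ih (acc ++ [s]) (acc' ++ [s]) (fun x hx => ?_))
      simp [h x (List.mem_cons_of_mem s hx)]

theorem pvDD_sublist (Y : List String) : ∀ (acc : List String), (pvDD acc Y).Sublist Y := by
  induction Y with
  | nil => intro acc; simp [pvDD]
  | cons s t ih =>
    intro acc
    by_cases hc : s ∈ acc
    · simp only [pvDD, hc, if_true]
      exact (ih acc).cons s
    · simp only [pvDD, hc, if_false]
      exact (ih (acc ++ [s])).cons₂ s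

theorem pvOfList_sublist (Y : List String) : (PySem.Set.ofList Y).Sublist Y := by
  rw [pvOfList_eq_dd]; exact pvDD_sublist Y []

-- dedup of a dedup-as-you-go fold is dedup of the concatenation
theorem pvOfList_foldl_add (Y : List String) : ∀ (init : List String),
    PySem.Set.ofList (Y.foldl PySem.Set.add init) = PySem.Set.ofList (init ++ Y) := by
  induction Y with
  | nil => intro init; simp
  | cons s t ih =>
    intro init
    by_cases h : s ∈ init
    · have h1 : PySem.Set.add init s = init := by
        simp [PySem.Set.add, PySem.Set.contains, List.contains_iff_mem, h]
      rw [List.foldl_cons, h1, ih init]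
      show List.foldl PySem.Set.add PySem.Set.empty (init ++ t)
        = List.foldl PySem.Set.add PySem.Set.empty (init ++ s :: t)
      rw [List.foldl_append, List.foldl_append, List.foldl_cons]
      congr 1
      have hc : (List.foldl PySem.Set.add PySem.Set.empty init).contains s = true := by
        have : s ∈ PySem.Set.ofList init := (PySem.Set.mem_ofList init s).mpr h
        simpa [PySem.Set.ofList, List.contains_iff_mem] using this
      show List.foldl PySem.Set.add PySem.Set.empty init
        = PySem.Set.add (List.foldl PySem.Set.add PySem.Set.empty init) s
      simp [PySem.Set.add, PySem.Set.contains]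
      exact (PySem.Set.mem_ofList init s).mpr h
    · have h1 : PySem.Set.add init s = init ++ [s] := by
        simp [PySem.Set.add, PySem.Set.contains, List.contains_iff_mem, h]
      rw [List.foldl_cons, h1, ih (init ++ [s])]
      congr 1
      simp

-- key characterisation ------------------------------------------------------

-- the key B sorts by
def pvKey (co : List String) (s : String) : Int :=
  if s ∈ co then (co.idxOf s : Int) else (co.length : Int)

theorem pvOi_getD (co : List String) : ∀ (i0 : Int) (d : PySem.Dict String Int) (s : String) (dflt : Int),
    ((PySem.List.enumerate co i0).foldl
        (fun (d : PySem.Dict String Int) p => if d.contains p.2 then d else d.insert p.2 p.1) d).getD s dflt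
    = if d.contains s then d.getD s dflt
      else if s ∈ co then i0 + (co.idxOf s : Int) else dflt := by
  induction co with
  | nil =>
    intro i0 d s dflt
    by_cases h : d.contains s
    · simp [PySem.List.enumerate, h]
    · have h0 : d.get? s = none := by
        simp only [PySem.Dict.get?, Option.map_eq_none_iff, List.find?_eq_none]
        intro p hp
        simp only [PySem.Dict.contains, List.any_eq_true, not_exists] at h
        intro hb; exact (h p) ⟨hp, hb⟩
      simp [PySem.List.enumerate, h, PySem.Dict.getD, h0]
  | cons c co' ih =>
    intro i0 d s dflt
    rw [PySem.List.enumerate_cons, List.foldl_cons]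
    by_cases hdc : d.contains c
    · rw [if_pos hdc, ih (i0 + 1) d s dflt]
      by_cases hds : d.contains s
      · simp [hds]
      · have hsc : s ≠ c := fun he => hds (he ▸ hdc)
        have hidx : (c :: co').idxOf s = co'.idxOf s + 1 := by
          simp [List.idxOf_cons, (by simpa using hsc.symm : (c == s) = false)]
        by_cases hmem : s ∈ co'
        · have : s ∈ c :: co' := List.mem_cons_of_mem c hmem
          simp only [hds, Bool.false_eq_true, if_false, hmem, if_true, this, hidx]
          push_cast; ring
        · have : s ∉ c :: co' := by simp [hsc, hmem]
          simp [hds, hmem, this]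
    · rw [if_neg hdc, ih (i0 + 1) (d.insert c i0) s dflt]
      by_cases hsc : s = c
      · subst hsc
        have h1 : (d.insert s i0).contains s = true := by
          simp [PySem.Dict.contains_insert]
        have h2 : (d.insert s i0).getD s dflt = i0 := by
          simp [PySem.Dict.getD_insert]
        simp [h1, h2, hdc, List.idxOf_cons]
      · have h1 : (d.insert c i0).contains s = d.contains s := by
          simp [PySem.Dict.contains_insert, (by simpa using hsc : (s == c) = false)]
        have h2 : (d.insert c i0).getD s dflt = d.getD s dflt := by
          simp [PySem.Dict.getD_insert, hsc]
        rw [h1, h2]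
        by_cases hds : d.contains s
        · simp [hds]
        · have hidx : (c :: co').idxOf s = co'.idxOf s + 1 := by
            simp [List.idxOf_cons, (by simpa using (Ne.symm hsc) : (c == s) = false)]
          by_cases hmem : s ∈ co'
          · have : s ∈ c :: co' := List.mem_cons_of_mem c hmem
            simp only [hds, Bool.false_eq_true, if_false, hmem, if_true, this, hidx]
            push_cast; ring
          · have : s ∉ c :: co' := by simp [hsc, hmem]
            simp [hds, hmem, this]

theorem pvKey_spec (co : List String) (s : String) :
    ((PySem.List.enumerate co 0).foldl
        (fun (d : PySem.Dict String Int) p => if d.contains p.2 then d else d.insert p.2 p.1)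
        PySem.Dict.empty).getD s (co.length : Int) = pvKey co s := by
  rw [pvOi_getD co 0 PySem.Dict.empty s (co.length : Int)]
  simp [PySem.Dict.contains_empty, pvKey]

-- sorted = grouped form -----------------------------------------------------

def pvGroups (k : String → Int) (n : Nat) (xs : List String) : List String :=
  (List.range (n + 1)).flatMap (fun (i : Nat) => xs.filter (fun s => k s == ((i : Nat) : Int)))

theorem pvInsertBy_append (bf : String → String → Bool) (x : String) :
    ∀ (ys zs : List String), (∀ y ∈ ys, bf x y = false) →
    PySem.List.insertBy bf x (ys ++ zs) = ys ++ PySem.List.insertBy bf x zs := by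
  intro ys zs h
  induction ys with
  | nil => simp
  | cons y t ih =>
    have hy : bf x y = false := h y List.mem_cons_self
    simp only [List.cons_append, PySem.List.insertBy, hy, Bool.false_eq_true, if_false]
    exact congrArg _ (ih (fun z hz => h z (List.mem_cons_of_mem y hz)))

theorem pvInsertBy_all_before (bf : String → String → Bool) (x : String) :
    ∀ (zs : List String), (∀ z ∈ zs, bf x z = true) →
    PySem.List.insertBy bf x zs = x :: zs := by
  intro zs h
  cases zs with
  | nil => rfl
  | cons z t => simp [PySem.List.insertBy, h z List.mem_cons_self]

theorem pvSorted_eq_groups (k : String → Int) (n : Nat)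
    (hk : ∀ s, 0 ≤ k s ∧ k s ≤ (n : Int)) :
    ∀ xs : List String, PySem.List.sorted xs k false = pvGroups k n xs := by
  intro xs
  induction xs using List.reverseRecOn with
  | nil => simp [PySem.List.sorted, pvGroups]
  | append_singleton xs x ih =>
    have hstep : PySem.List.sorted (xs ++ [x]) k false
        = PySem.List.insertBy (fun a b => decide (k a < k b)) x (PySem.List.sorted xs k false) := by
      rw [PySem.List.sorted_eq_foldl_insertBy, PySem.List.sorted_eq_foldl_insertBy,
        List.foldl_append, List.foldl_cons, List.foldl_nil]
    rw [hstep, ih]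
    have hx0 := (hk x).1
    have hxn := (hk x).2
    set v : Nat := (k x).toNat with hv
    have hkx : k x = (v : Int) := (Int.toNat_of_nonneg hx0).symm
    have hvn : v ≤ n := by omega
    have hsplit : n + 1 = (v + 1) + (n - v) := by omega
    have hrange : List.range (n + 1)
        = (List.range v ++ [v]) ++ (List.range (n - v)).map (fun j => (v + 1) + j) := by
      rw [hsplit, List.range_add, List.range_succ]
    -- groups of xs
    set f : Nat → List String := fun (i : Nat) => xs.filter (fun s => k s == ((i : Nat) : Int)) with hf
    set f' : Nat → List String := fun (i : Nat) => (xs ++ [x]).filter (fun s => k s == ((i : Nat) : Int)) with hf'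
    have hff' : ∀ i, f' i = f i ++ (if k x == (i : Int) then [x] else []) := by
      intro i
      simp only [hf, hf', List.filter_append, List.filter_cons, List.filter_nil]
    have hne : ∀ i : Nat, i ≠ v → f' i = f i := by
      intro i hi
      rw [hff' i, if_neg, List.append_nil]
      simp only [beq_iff_eq, hkx, Nat.cast_inj]
      exact fun h => hi h.symm
    have hveq : f' v = f v ++ [x] := by
      rw [hff' v, if_pos]; simp [hkx]
    -- rewrite both sides along the range decomposition
    unfold pvGroups
    rw [hrange, List.flatMap_append, List.flatMap_append, List.flatMap_append,
      List.flatMap_append]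
    have hcong1 : (List.range v).flatMap f' = (List.range v).flatMap f := by
      apply List.flatMap_congr
      intro i hi; exact hne i (by have := List.mem_range.mp hi; omega)
    have hcong2 : ((List.range (n - v)).map (fun j => (v + 1) + j)).flatMap f'
        = ((List.range (n - v)).map (fun j => (v + 1) + j)).flatMap f := by
      apply List.flatMap_congr
      intro i hi
      obtain ⟨j, _, rfl⟩ := List.mem_map.mp hi
      exact hne _ (by omega)
    rw [hcong1, hcong2]
    simp only [List.flatMap_singleton, hveq]
    -- left side: insert x into grouped xs
    have hA1 : ∀ y ∈ (List.range v).flatMap f ++ f v, (decide (k x < k y)) = false := by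
      intro y hy
      rcases List.mem_append.mp hy with hy | hy
      · obtain ⟨i, hi, hyi⟩ := List.mem_flatMap.mp hy
        have hky : k y = (i : Int) := by
          have := List.of_mem_filter hyi; simpa [hf, beq_iff_eq] using this
        have hiv : i < v := List.mem_range.mp hi
        simp only [decide_eq_false_iff_not, not_lt, hky, hkx]
        exact_mod_cast Nat.le_of_lt hiv
      · have hky : k y = (v : Int) := by
          have := List.of_mem_filter hy; simpa [hf, beq_iff_eq] using this
        simp [hky, hkx]
    have hA2 : ∀ z ∈ ((List.range (n - v)).map (fun j => (v + 1) + j)).flatMap f,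
        (decide (k x < k z)) = true := by
      intro z hz
      obtain ⟨i, hi, hzi⟩ := List.mem_flatMap.mp hz
      obtain ⟨j, _, rfl⟩ := List.mem_map.mp hi
      have hkz : k z = ((v + 1 + j : Nat) : Int) := by
        have := List.of_mem_filter hzi; simpa [hf, beq_iff_eq] using this
      simp only [decide_eq_true_eq, hkz, hkx]
      exact_mod_cast Nat.lt_of_lt_of_le (Nat.lt_succ_self v) (Nat.le_add_right _ j)
    have hveq' : xs.filter (fun s => k s == ((v : Nat) : Int)) ++ [x]
        = (xs ++ [x]).filter (fun s => k s == ((v : Nat) : Int)) := by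
      have := hveq; simp only [hf, hf'] at this; exact this.symm
    rw [← hveq']
    rw [pvInsertBy_append _ _ _ _ hA1, pvInsertBy_all_before _ _ _ hA2]
    simp [hf]

-- pairwise facts ------------------------------------------------------------

theorem pvCP (co : List String) : ∀ (p : String → Bool),
    (PySem.Set.ofList (co.filter p)).Pairwise (fun s t => co.idxOf s < co.idxOf t) := by
  induction co with
  | nil => intro p; simp [PySem.Set.ofList]
  | cons c co' ih =>
    intro p
    have hshift : ∀ a : String, a ≠ c → (c :: co').idxOf a = co'.idxOf a + 1 := by
      intro a ha
      simp [List.idxOf_cons, (by simpa using ha.symm : (c == a) = false)]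
    by_cases hpc : p c
    · rw [List.filter_cons_of_pos hpc]
      have h1 : PySem.Set.ofList (c :: co'.filter p)
          = c :: pvDD [c] (co'.filter p) := by
        rw [pvOfList_eq_dd]
        simp [pvDD]
      have h2 : pvDD [c] (co'.filter p)
          = PySem.Set.ofList (co'.filter (fun s => !(s == c) && p s)) := by
        rw [pvDD_filter (co'.filter p) [c] (fun s => !(s == c))
            (fun s _ hq => by simpa using List.mem_singleton.mpr (by simpa using hq)),
          pvDD_congr ((co'.filter p).filter (fun s => !(s == c))) [c] []
            (fun s hs => by
              have := List.of_mem_filter hs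
              simp at this ⊢
              exact this),
          ← pvOfList_eq_dd, List.filter_filter]
      rw [h1, h2]
      constructor
      · intro b hb
        have hbmem := (PySem.Set.mem_ofList _ b).mp hb
        have hbne : b ≠ c := by
          have := List.of_mem_filter hbmem; simp at this; exact this.1
        rw [hshift b hbne]
        simp [List.idxOf_cons]
      · refine (ih (fun s => !(s == c) && p s)).imp_of_mem ?_
        intro a b ha hb hab
        have hane : a ≠ c := by
          have := List.of_mem_filter ((PySem.Set.mem_ofList _ a).mp ha); simp at this; exact this.1
        have hbne : b ≠ c := by
          have := List.of_mem_filter ((PySem.Set.mem_ofList _ b).mp hb); simp at this; exact this.1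
        rw [hshift a hane, hshift b hbne]
        omega
    · rw [List.filter_cons_of_neg hpc]
      refine (ih p).imp_of_mem ?_
      intro a b ha hb hab
      have hane : a ≠ c := by
        have := List.of_mem_filter ((PySem.Set.mem_ofList _ a).mp ha)
        exact fun he => hpc (he ▸ this)
      have hbne : b ≠ c := by
        have := List.of_mem_filter ((PySem.Set.mem_ofList _ b).mp hb)
        exact fun he => hpc (he ▸ this)
      rw [hshift a hane, hshift b hbne]
      omega

theorem pvKey_bounds (co : List String) (s : String) :
    0 ≤ pvKey co s ∧ pvKey co s ≤ (co.length : Int) := by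
  unfold pvKey
  by_cases h : s ∈ co
  · simp only [h, if_true]
    constructor
    · exact Int.natCast_nonneg _
    · exact_mod_cast Nat.le_of_lt (List.idxOf_lt_length_of_mem h)
  · simp [h]

theorem pvKey_of_mem (co : List String) (s : String) (h : s ∈ co) :
    pvKey co s = (co.idxOf s : Int) := by simp [pvKey, h]

theorem pvKey_of_not_mem (co : List String) (s : String) (h : s ∉ co) :
    pvKey co s = (co.length : Int) := by simp [pvKey, h]

theorem pvGroups_pairwise (k : String → Int) (kept : List String) :
    ∀ (is : List Nat), is.Pairwise (· < ·) →
    (is.flatMap (fun (i : Nat) => kept.filter (fun s => k s == ((i : Nat) : Int)))).Pairwise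
      (fun s t => k s ≤ k t) := by
  intro is
  induction is with
  | nil => intro _; simp
  | cons i is' ih =>
    intro h
    rw [List.pairwise_cons] at h
    rw [List.flatMap_cons, List.pairwise_append]
    refine ⟨?_, ih h.2, ?_⟩
    · refine List.pairwise_of_forall_mem_list ?_
      intro a ha b hb
      have ha' : k a = (i : Int) := by simpa [beq_iff_eq] using List.of_mem_filter ha
      have hb' : k b = (i : Int) := by simpa [beq_iff_eq] using List.of_mem_filter hb
      omega
    · intro a ha b hb
      have ha' : k a = (i : Int) := by simpa [beq_iff_eq] using List.of_mem_filter ha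
      obtain ⟨j, hj, hbj⟩ := List.mem_flatMap.mp hb
      have hb' : k b = (j : Int) := by simpa [beq_iff_eq] using List.of_mem_filter hbj
      have : i < j := h.1 j hj
      rw [ha', hb']
      exact_mod_cast Nat.le_of_lt this

-- membership of the non-default groups
theorem pvMemU (co kept : List String) (a : String) :
    a ∈ (List.range co.length).flatMap
        (fun (i : Nat) => kept.filter (fun s => pvKey co s == ((i : Nat) : Int)))
      ↔ a ∈ kept ∧ a ∈ co := by
  constructor
  · intro h
    obtain ⟨i, hi, hai⟩ := List.mem_flatMap.mp h
    have hak : a ∈ kept := List.mem_of_mem_filter hai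
    refine ⟨hak, ?_⟩
    by_contra hac
    have : pvKey co a = (co.length : Int) := pvKey_of_not_mem co a hac
    have h2 : pvKey co a = (i : Int) := by simpa [beq_iff_eq] using List.of_mem_filter hai
    have : (co.length : Int) = (i : Int) := by omega
    have := List.mem_range.mp hi
    omega
  · rintro ⟨hak, hac⟩
    refine List.mem_flatMap.mpr ⟨co.idxOf a, ?_, ?_⟩
    · exact List.mem_range.mpr (List.idxOf_lt_length_of_mem hac)
    · refine List.mem_filter.mpr ⟨hak, ?_⟩
      simp [pvKey_of_mem co a hac]

theorem pvOfListU_eq (co kept : List String) :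
    PySem.Set.ofList ((List.range co.length).flatMap
        (fun (i : Nat) => kept.filter (fun s => pvKey co s == ((i : Nat) : Int))))
    = PySem.Set.ofList (co.filter (fun sec => kept.contains sec)) := by
  set U := (List.range co.length).flatMap
      (fun (i : Nat) => kept.filter (fun s => pvKey co s == ((i : Nat) : Int))) with hU
  set X := co.filter (fun sec => kept.contains sec) with hX
  have hmemX : ∀ a, a ∈ X ↔ a ∈ co ∧ a ∈ kept := by
    intro a
    rw [hX, List.mem_filter, List.contains_iff_mem]
  refine List.Perm.eq_of_pairwise (le := fun s t => co.idxOf s < co.idxOf t) ?_ ?_ ?_ ?_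
  · intro a b _ _ h1 h2; omega
  · -- pairwise on ofList U
    have hle : ((PySem.Set.ofList U)).Pairwise (fun s t => pvKey co s ≤ pvKey co t) :=
      List.Pairwise.sublist (pvOfList_sublist U) (pvGroups_pairwise (pvKey co) kept
        (List.range co.length) (List.pairwise_lt_range))
    have hnd : (PySem.Set.ofList U).Pairwise (fun s t => s ≠ t) := PySem.Set.nodup_ofList U
    refine (hle.and hnd).imp_of_mem ?_
    intro a b ha hb hab
    have haU := (PySem.Set.mem_ofList U a).mp ha
    have hbU := (PySem.Set.mem_ofList U b).mp hb
    have hac : a ∈ co := ((pvMemU co kept a).mp haU).2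
    have hbc : b ∈ co := ((pvMemU co kept b).mp hbU).2
    have h1 : (co.idxOf a : Int) ≤ (co.idxOf b : Int) := by
      have := hab.1
      rwa [pvKey_of_mem co a hac, pvKey_of_mem co b hbc] at this
    have h2 : co.idxOf a ≠ co.idxOf b := by
      intro he
      apply hab.2
      have h3 := List.getElem_idxOf (List.idxOf_lt_length_of_mem hac) (x := a)
      have h4 := List.getElem_idxOf (List.idxOf_lt_length_of_mem hbc) (x := b)
      rw [← h3, ← h4]
      congr 1
    have : co.idxOf a ≤ co.idxOf b := by exact_mod_cast h1
    omega
  · exact pvCP co (fun sec => kept.contains sec)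
  · rw [List.perm_ext_iff_of_nodup (PySem.Set.nodup_ofList U) (PySem.Set.nodup_ofList X)]
    intro a
    rw [PySem.Set.mem_ofList, PySem.Set.mem_ofList, pvMemU co kept a, hmemX a]
    tauto

theorem pvMain (co kept : List String) :
    PySem.List.dedup (kept.foldl (fun acc sec => if acc.contains sec then acc else acc ++ [sec])
        (co.foldl (fun acc sec => if kept.contains sec then acc ++ [sec] else acc) []))
    = PySem.List.dedup (PySem.List.sorted kept
        (fun s => ((PySem.List.enumerate co 0).foldl
            (fun (d : PySem.Dict String Int) p => if d.contains p.2 then d else d.insert p.2 p.1)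
            PySem.Dict.empty).getD s (co.length : Int)) false) := by
  have hkey : (fun s => ((PySem.List.enumerate co 0).foldl
      (fun (d : PySem.Dict String Int) p => if d.contains p.2 then d else d.insert p.2 p.1)
      PySem.Dict.empty).getD s (co.length : Int)) = pvKey co := funext (pvKey_spec co)
  rw [hkey, pvSorted_eq_groups (pvKey co) co.length (pvKey_bounds co) kept]
  have hordered : co.foldl (fun acc sec => if kept.contains sec then acc ++ [sec] else acc) []
      = co.filter (fun sec => kept.contains sec) := by
    simpa using PySem.List.foldl_append_if (fun sec => kept.contains sec) id co []
  rw [hordered]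
  set X := co.filter (fun sec => kept.contains sec) with hX
  set V := kept.filter (fun s => !(co.contains s)) with hV
  rw [PySem.List.dedup_eq_ofList, PySem.List.dedup_eq_ofList]
  have hfold : kept.foldl (fun acc sec => if acc.contains sec then acc else acc ++ [sec]) X
      = kept.foldl PySem.Set.add X := rfl
  rw [hfold, pvOfList_foldl_add kept X]
  -- split the grouped form at the default key
  unfold pvGroups
  have hr : List.range (co.length + 1) = List.range co.length ++ [co.length] :=
    List.range_succ
  rw [hr, List.flatMap_append, List.flatMap_singleton]
  set U := (List.range co.length).flatMap
      (fun (i : Nat) => kept.filter (fun s => pvKey co s == ((i : Nat) : Int))) with hU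
  have hgN : kept.filter (fun s => pvKey co s == ((co.length : Nat) : Int)) = V := by
    rw [hV]
    apply List.filter_congr
    intro s _
    by_cases h : s ∈ co
    · have h2 : co.idxOf s < co.length := List.idxOf_lt_length_of_mem h
      have hc : co.contains s = true := List.contains_iff_mem.mpr h
      rw [pvKey_of_mem _ _ h, hc]
      simp only [Bool.not_true]
      rw [beq_eq_false_iff_ne]
      intro he
      have : co.idxOf s = co.length := by exact_mod_cast he
      omega
    · have hc : co.contains s = false := by simp [List.contains_iff_mem, h]
      rw [pvKey_of_not_mem _ _ h, hc]
      simp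
  rw [hgN]
  -- both sides are ofList-of-append; reduce each to  prefix ++ pvDD [] V
  have hmemX : ∀ a, a ∈ X ↔ a ∈ co ∧ a ∈ kept := by
    intro a; rw [hX, List.mem_filter, List.contains_iff_mem]
  have hVnotco : ∀ s ∈ V, s ∉ co := by
    intro s hs
    have := (List.mem_filter.mp (hV ▸ hs)).2
    simp [List.contains_iff_mem] at this
    exact this
  have hL : PySem.Set.ofList (X ++ kept) = PySem.Set.ofList X ++ pvDD [] V := by
    show List.foldl PySem.Set.add PySem.Set.empty (X ++ kept) = _
    rw [List.foldl_append]
    rw [show List.foldl PySem.Set.add PySem.Set.empty X = PySem.Set.ofList X from rfl]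
    rw [pvFoldlAdd_eq_dd kept (PySem.Set.ofList X)]
    congr 1
    rw [pvDD_filter kept (PySem.Set.ofList X) (fun s => !(co.contains s))
        (fun s hs hq => by
          have hsco : s ∈ co := by simpa [List.contains_iff_mem] using hq
          exact (PySem.Set.mem_ofList X s).mpr ((hmemX s).mpr ⟨hsco, hs⟩))]
    rw [← hV]
    exact pvDD_congr V (PySem.Set.ofList X) [] (fun s hs => by
      have h1 : s ∉ co := hVnotco s hs
      constructor
      · intro hmem
        exact absurd ((hmemX s).mp ((PySem.Set.mem_ofList X s).mp hmem)).1 h1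
      · intro hmem; cases hmem)
  have hR : PySem.Set.ofList (U ++ V) = PySem.Set.ofList U ++ pvDD [] V := by
    show List.foldl PySem.Set.add PySem.Set.empty (U ++ V) = _
    rw [List.foldl_append]
    rw [show List.foldl PySem.Set.add PySem.Set.empty U = PySem.Set.ofList U from rfl]
    rw [pvFoldlAdd_eq_dd V (PySem.Set.ofList U)]
    congr 1
    exact pvDD_congr V (PySem.Set.ofList U) [] (fun s hs => by
      have h1 : s ∉ co := hVnotco s hs
      constructor
      · intro hmem
        exact absurd ((pvMemU co kept s).mp ((PySem.Set.mem_ofList U s).mp hmem)).2 h1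
      · intro hmem; cases hmem)
  rw [hL, hR, pvOfListU_eq co kept]

-- ===== VERDICT (by name: the statement is the Claim_ definition above) =====
theorem apply_custom_requirements_py_spec : Claim_equal_apply_custom_requirements_py := by
  intro sections requirements _
  unfold Spec_apply_custom_requirements_py
  unfold apply_custom_requirements_py apply_custom_requirements_py_alt
  simp only [PySem.Dict.getD]
  cases h1 : (PySem.Dict.mk requirements).get? "required_sections" <;>
    cases h2 : (PySem.Dict.mk requirements).get? "excluded_sections" <;>
      cases h3 : (PySem.Dict.mk requirements).get? "section_order" <;>
        simp only [h1, h2, h3, Option.getD_some, Option.getD_none, List.append_nil] <;>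
        (try simp only [List.contains_nil, Bool.not_false, List.filter_true]) <;>
        (try first | rfl | exact pvMain _ _)
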